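-- pv_equiv track=rewrite | github.com/AleksOfficial/Codecademy | Advent_of_Code/Advent_of_Code_2019/Day10_2019/Day10_2019.py | positions_asteroids
-- ===== SOURCE A (Python) =====
-- def positions_asteroids(mapfile):
--     asteroids = []
--     maplist = mapfile.split("\n")
--     for line in range(len(maplist)):
--         for column in range(len(maplist[line])):
--             if maplist[line][column]=="#":
--               asteroids.append((column,line))
--     return asteroids
-- ===== SOURCE B (Python) =====
-- def positions_asteroids(mapfile):
--     asteroids = []
--     col = 0
--     row = 0
--     for ch in mapfile:
--         if ch == "\n":
--             col = 0
--             row += 1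
--         elif ch == "#":
--             asteroids.append((col, row))
--             col += 1
--         else:
--             col += 1
--     return asteroids
-- ===== Notes on version B (the rewrite author's own statement) =====
-- stated objective: alternative
-- what changed: Replaces split-into-lines plus nested index loops with a single linear pass over the raw string: a column/row state machine that resets the column and bumps the row at each newline and records the current coordinates at each asteroid character, never materialising the line list.
import Mathlib
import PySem

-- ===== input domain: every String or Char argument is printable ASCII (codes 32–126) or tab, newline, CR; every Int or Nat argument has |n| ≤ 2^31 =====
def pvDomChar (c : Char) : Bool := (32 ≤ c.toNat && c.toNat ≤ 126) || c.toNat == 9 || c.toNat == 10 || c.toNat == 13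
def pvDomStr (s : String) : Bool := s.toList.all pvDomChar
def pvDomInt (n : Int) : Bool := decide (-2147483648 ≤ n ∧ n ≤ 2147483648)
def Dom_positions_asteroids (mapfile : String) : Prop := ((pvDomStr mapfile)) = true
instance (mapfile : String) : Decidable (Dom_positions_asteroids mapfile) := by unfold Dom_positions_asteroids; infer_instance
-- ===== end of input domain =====

-- B replaces split-into-lines + nested index loops with ONE linear pass over the raw string
-- (a (col,row) state machine); return values are proved equal on every input.

-- ===== PORT A =====
-- A: maplist = mapfile.split("\n"); for line in range(len(maplist)): for column in
-- range(len(maplist[line])): append (column, line) if the char is '#'.  The indices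
-- maplist[line] / line[column] are always in range, so the total pyGetD form is exact there.
def positions_asteroids (mapfile : String) : List (Int × Int) :=
  let maplist := PySem.Chars.splitOn mapfile.toList ['\n']
  (PySem.List.pyRange 0 (maplist.length : Int) 1).foldl
    (fun asteroids line =>
      let l := PySem.List.pyGetD maplist line []
      (PySem.List.pyRange 0 (l.length : Int) 1).foldl
        (fun acc column =>
          if PySem.List.pyGetD l column ' ' = '#' then acc ++ [(column, line)] else acc)
        asteroids)
    []

-- ===== PORT B =====
-- Source B's 'for ch in mapfile' loop, one recursive step per character, over the same
-- (col, row, asteroids) state, branches in the same order.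
def pvScan : List Char → Int → Int → List (Int × Int) → List (Int × Int)
  | [], _, _, acc => acc
  | c :: t, col, row, acc =>
    if c = '\n' then pvScan t 0 (row + 1) acc
    else if c = '#' then pvScan t (col + 1) row (acc ++ [(col, row)])
    else pvScan t (col + 1) row acc

def positions_asteroids_alt (mapfile : String) : List (Int × Int) :=
  pvScan mapfile.toList 0 0 []

-- ===== PRECONDITION & SPEC =====
def Spec_positions_asteroids (mapfile : String) (out : List (Int × Int)) : Prop := out = positions_asteroids_alt mapfile
instance (mapfile : String) (out : List (Int × Int)) : Decidable (Spec_positions_asteroids mapfile out) := by unfold Spec_positions_asteroids; infer_instance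

-- ===== CLAIM (what is proved, stated in full; the proofs are below) =====
def Claim_equal_positions_asteroids : Prop := ∀ (mapfile : String), Dom_positions_asteroids mapfile → Spec_positions_asteroids mapfile (positions_asteroids mapfile)

-- ===== LEMMAS AND PROOFS =====

-- the columns of the '#' characters of a line, paired with the row, column of the head being i
def hxr (r : Int) : List Char → Int → List (Int × Int)
  | [], _ => []
  | c :: t, i => if c = '#' then (i, r) :: hxr r t (i + 1) else hxr r t (i + 1)

-- the '#' positions of a list of lines, rows numbered from r
def hall : List (List Char) → Int → List (Int × Int)
  | [], _ => []
  | l :: ls, r => hxr r l 0 ++ hall ls (r + 1)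

-- reference splitter: split on '\n', structurally
def mySplit : List Char → List (List Char)
  | [] => [[]]
  | c :: t => if c = '\n' then [] :: mySplit t
              else (c :: (mySplit t).headD []) :: (mySplit t).tail

theorem mySplit_ne_nil (l : List Char) : mySplit l ≠ [] := by
  cases l with
  | nil => simp [mySplit]
  | cons c t => by_cases h : c = '\n' <;> simp [mySplit, h]

-- PySem's fuel-driven splitOn.go agrees with mySplit
theorem go_eq_mySplit : ∀ (fuel : Nat) (l cur : List Char) (acc : List (List Char)),
    l.length < fuel →
    PySem.Chars.splitOn.go ['\n'] fuel l cur acc =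
      acc.reverse ++ (cur.reverse ++ (mySplit l).headD []) :: (mySplit l).tail := by
  intro fuel
  induction fuel with
  | zero => intro l cur acc h; omega
  | succ fuel ih =>
    intro l cur acc h
    cases l with
    | nil => simp [PySem.Chars.splitOn.go, mySplit]
    | cons c t =>
      by_cases hc : c = '\n'
      · subst hc
        rw [PySem.Chars.splitOn.go]
        rw [if_pos (by simp [List.isPrefixOf])]
        have hdrop : List.drop (['\n'].length) ('\n' :: t) = t := rfl
        rw [hdrop]
        rw [ih t [] _ (by simpa using h)]
        rcases ht : mySplit t with _ | ⟨hd, tl⟩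
        · exact absurd ht (mySplit_ne_nil t)
        · simp [mySplit, ht]
      · rw [PySem.Chars.splitOn.go]
        rw [if_neg (by simp [List.isPrefixOf]; exact fun h' => hc h'.symm)]
        rw [ih t (c :: cur) acc (by simpa using h)]
        simp [mySplit, hc]

theorem splitOn_eq_mySplit (l : List Char) :
    PySem.Chars.splitOn l ['\n'] = mySplit l := by
  show PySem.Chars.splitOn.go ['\n'] (l.length + 1) l [] [] = mySplit l
  rw [go_eq_mySplit (l.length + 1) l [] [] (by omega)]
  rcases h : mySplit l with _ | ⟨hd, tl⟩
  · exact absurd h (mySplit_ne_nil l)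
  · simp

-- B's scan computes: remaining head line from column col, then the remaining lines
theorem pvScan_eq : ∀ (cs : List Char) (col row : Int) (acc : List (Int × Int)),
    pvScan cs col row acc =
      acc ++ hxr row ((mySplit cs).headD []) col ++ hall (mySplit cs).tail (row + 1) := by
  intro cs
  induction cs with
  | nil => intro col row acc; simp [pvScan, mySplit, hxr, hall]
  | cons c t ih =>
    intro col row acc
    by_cases hc : c = '\n'
    · subst hc
      rw [pvScan, if_pos rfl]
      rw [ih 0 (row + 1) acc]
      rcases ht : mySplit t with _ | ⟨hd, tl⟩
      · exact absurd ht (mySplit_ne_nil t)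
      · simp [mySplit, ht, hxr, hall]
    · by_cases hh : c = '#'
      · subst hh
        rw [pvScan, if_neg hc, if_pos rfl]
        rw [ih (col + 1) row (acc ++ [(col, row)])]
        simp [mySplit, hc, hxr]
      · rw [pvScan, if_neg hc, if_neg hh]
        rw [ih (col + 1) row acc]
        simp [mySplit, hc, hxr, hh]

-- A's inner column loop builds hxr (via enumerate)
theorem enum_fold (r0 : Int) : ∀ (l : List Char) (i : Int) (acc : List (Int × Int)),
    (PySem.List.enumerate l i).foldl
      (fun acc p => if p.2 = '#' then acc ++ [(p.1, r0)] else acc) acc = acc ++ hxr r0 l i := by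
  intro l
  induction l with
  | nil => intro i acc; simp [PySem.List.enumerate_nil, hxr]
  | cons c t ih =>
    intro i acc
    rw [PySem.List.enumerate_cons, List.foldl_cons]
    by_cases hc : c = '#'
    · simp only [hc, hxr, ih]
      simp
    · simp only [hxr, hc, if_false, ih]

theorem inner_A_eq (l : List Char) (row : Int) (acc : List (Int × Int)) :
    (PySem.List.pyRange 0 (l.length : Int) 1).foldl
      (fun acc column =>
        if PySem.List.pyGetD l column ' ' = '#' then acc ++ [(column, row)] else acc)
      acc = acc ++ hxr row l 0 := by
  have h := enum_fold row l 0 acc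
  rw [PySem.List.enumerate_eq_map_pyRange l ' ', List.foldl_map] at h
  exact h

-- A's outer line loop (via enumerate) builds hall
theorem outer_A_eq : ∀ (ls : List (List Char)) (i : Int) (acc : List (Int × Int)),
    (PySem.List.enumerate ls i).foldl
      (fun asteroids p =>
        (PySem.List.pyRange 0 (p.2.length : Int) 1).foldl
          (fun acc column =>
            if PySem.List.pyGetD p.2 column ' ' = '#' then acc ++ [(column, p.1)] else acc)
          asteroids)
      acc = acc ++ hall ls i := by
  intro ls
  induction ls with
  | nil => intro i acc; simp [PySem.List.enumerate_nil, hall]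
  | cons l t ih =>
    intro i acc
    rw [PySem.List.enumerate_cons, List.foldl_cons, inner_A_eq, ih, hall]
    simp

-- A's outer loop in its literal pyRange form
theorem outer_A_pyRange (ls : List (List Char)) :
    (PySem.List.pyRange 0 (ls.length : Int) 1).foldl
      (fun asteroids line =>
        (PySem.List.pyRange 0 ((PySem.List.pyGetD ls line []).length : Int) 1).foldl
          (fun acc column =>
            if PySem.List.pyGetD (PySem.List.pyGetD ls line []) column ' ' = '#' then
              acc ++ [(column, line)]
            else acc)
          asteroids)
      [] = hall ls 0 := by
  have h := outer_A_eq ls 0 []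
  rw [PySem.List.enumerate_eq_map_pyRange ls [], List.foldl_map] at h
  simpa using h

-- ===== VERDICT (by name: the statement is the Claim_ definition above) =====
theorem positions_asteroids_spec : Claim_equal_positions_asteroids := by
  intro mapfile _
  unfold Spec_positions_asteroids positions_asteroids positions_asteroids_alt
  simp only [outer_A_pyRange, pvScan_eq, splitOn_eq_mySplit]
  rcases h : mySplit mapfile.toList with _ | ⟨hd, tl⟩
  · exact absurd h (mySplit_ne_nil mapfile.toList)
  · simp [hall]
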